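-- pv_equiv track=rewrite | github.com/magicbuka/python_projects | 28_survived/Keymaker.py | Keymaker
-- ===== SOURCE A (Python) =====
-- def Keymaker(k):
--     if k == 1:
--         return '1'
--
--     line_doors = [0] * k
--     for i in range(1, k+1):
--         if i**2 <= k:
--             line_doors[(i**2)-1] = 1
--
--     return ''.join([str(x) for x in line_doors])
-- ===== SOURCE B (Python) =====
-- def Keymaker(k):
--     # One forward pass over the positions 1..k, tracking the next square r*r
--     # instead of scatter-writing into a preallocated array.
--     out = []
--     r = 1
--     for j in range(1, k + 1):
--         if j == r * r:
--             out.append('1')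
--             r += 1
--         else:
--             out.append('0')
--     return ''.join(out)
-- ===== Notes on version B (the rewrite author's own statement) =====
-- stated objective: alternative
-- what changed: Replaces the scatter-write into a preallocated [0]*k int array (looping over candidate roots i and marking index i*i-1, then str()-ing every element) by a single forward pass over the positions with a running next-root counter that emits the characters directly; the single-door special-case branch disappears.
import Mathlib
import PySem

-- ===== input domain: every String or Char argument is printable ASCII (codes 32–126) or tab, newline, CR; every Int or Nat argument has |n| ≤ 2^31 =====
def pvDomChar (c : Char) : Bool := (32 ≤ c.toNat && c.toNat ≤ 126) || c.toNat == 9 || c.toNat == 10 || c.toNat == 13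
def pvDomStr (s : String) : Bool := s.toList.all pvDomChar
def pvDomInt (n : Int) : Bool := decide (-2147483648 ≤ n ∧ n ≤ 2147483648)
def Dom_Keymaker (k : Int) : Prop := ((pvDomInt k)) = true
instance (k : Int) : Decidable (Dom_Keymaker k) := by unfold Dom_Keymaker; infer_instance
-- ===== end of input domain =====

-- B replaces A's scatter-write into a preallocated [0]*k array by a single pass over
-- positions 1..k with a running next-root counter (objective: alternative, same O(k)).

-- ===== PORT A =====
def Keymaker (k : Int) : String :=
  if k == 1 then "1"
  else
    -- line_doors = [0] * k   ([] when k ≤ 0, exactly as in Python)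
    let line₀ : List Int := List.replicate k.toNat 0
    -- for i in range(1, k+1): if i**2 <= k: line_doors[(i**2)-1] = 1
    let line := (PySem.List.pyRange 1 (k+1) 1).foldl
      (fun acc i => if i^2 ≤ k then PySem.List.pySetD acc (i^2 - 1) 1 else acc) line₀
    -- ''.join([str(x) for x in line_doors])
    PySem.Str.join "" (line.map PySem.Int.toStr)

-- ===== PORT B =====
-- ''.join over a list of one-character strings is exactly String.ofList of the chars.
def Keymaker_alt (k : Int) : String :=
  let res := (PySem.List.pyRange 1 (k+1) 1).foldl
    (fun (s : List Char × Int) j =>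
      if j == s.2 * s.2 then (s.1 ++ ['1'], s.2 + 1) else (s.1 ++ ['0'], s.2))
    ([], 1)
  String.ofList res.1

-- ===== PRECONDITION & SPEC =====
def Spec_Keymaker (k : Int) (out : String) : Prop := out = Keymaker_alt k
instance (k : Int) (out : String) : Decidable (Spec_Keymaker k out) := by unfold Spec_Keymaker; infer_instance

-- ===== CLAIM (what is proved, stated in full; the proofs are below) =====
def Claim_equal_Keymaker : Prop := ∀ (k : Int), Dom_Keymaker k → Spec_Keymaker k (Keymaker k)

-- ===== LEMMAS AND PROOFS =====

-- is m a perfect square (proof-side helper)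
def pvSqb (m : Nat) : Bool := Nat.sqrt m * Nat.sqrt m == m

-- the common value: one char per position 1..n, '1' exactly at the squares
def pvTgt (n : Nat) : List Char := (List.range n).map (fun t => if pvSqb (t+1) then '1' else '0')

lemma pvSqrt_unique (m s : Nat) (h1 : s*s ≤ m) (h2 : m < (s+1)*(s+1)) : Nat.sqrt m = s := by
  have ha : s ≤ Nat.sqrt m := Nat.le_sqrt.mpr h1
  have hb : Nat.sqrt m < s + 1 := Nat.sqrt_lt.mpr h2
  omega

lemma pvLemA (n : Nat) :
    n + 1 = (Nat.sqrt n + 1) * (Nat.sqrt n + 1) ↔ Nat.sqrt (n+1) * Nat.sqrt (n+1) = n + 1 := by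
  have hs1 : Nat.sqrt n * Nat.sqrt n ≤ n := Nat.sqrt_le n
  have hs2 : n < (Nat.sqrt n + 1) * (Nat.sqrt n + 1) := by
    have := Nat.lt_succ_sqrt n; simpa [Nat.succ_eq_add_one] using this
  constructor
  · intro h
    have ht : Nat.sqrt (n+1) = Nat.sqrt n + 1 :=
      pvSqrt_unique (n+1) (Nat.sqrt n + 1) (le_of_eq h.symm) (by nlinarith)
    rw [ht]; omega
  · intro h
    have hgt : Nat.sqrt n < Nat.sqrt (n+1) := by
      by_contra hc
      have hc' : Nat.sqrt (n+1) ≤ Nat.sqrt n := Nat.le_of_not_lt hc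
      have := Nat.mul_le_mul hc' hc'
      omega
    have hle : Nat.sqrt (n+1) ≤ Nat.sqrt n + 1 := by
      by_contra hc
      have hc' : Nat.sqrt n + 2 ≤ Nat.sqrt (n+1) := Nat.lt_of_not_le hc
      have : (Nat.sqrt n + 2) * (Nat.sqrt n + 2) ≤ Nat.sqrt (n+1) * Nat.sqrt (n+1) :=
        Nat.mul_le_mul hc' hc'
      nlinarith
    have ht : Nat.sqrt (n+1) = Nat.sqrt n + 1 := by omega
    rw [← ht]; exact h.symm

lemma pvLemB (n : Nat) :
    Nat.sqrt (n+1) = if Nat.sqrt (n+1) * Nat.sqrt (n+1) = n + 1 then Nat.sqrt n + 1 else Nat.sqrt n := by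
  have hs1 : Nat.sqrt n * Nat.sqrt n ≤ n := Nat.sqrt_le n
  have hs2 : n < (Nat.sqrt n + 1) * (Nat.sqrt n + 1) := by
    have := Nat.lt_succ_sqrt n; simpa [Nat.succ_eq_add_one] using this
  split_ifs with h
  · exact pvSqrt_unique (n+1) (Nat.sqrt n + 1) (le_of_eq ((pvLemA n).mpr h).symm) (by nlinarith [(pvLemA n).mpr h])
  · apply pvSqrt_unique
    · omega
    · rcases Nat.lt_or_ge (n+1) ((Nat.sqrt n + 1) * (Nat.sqrt n + 1)) with hlt | hge
      · exact hlt
      · exfalso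
        have heq : n + 1 = (Nat.sqrt n + 1) * (Nat.sqrt n + 1) := by omega
        exact h ((pvLemA n).mp heq)

-- B's loop invariant: chars so far + the next candidate root
lemma pvB_fold (n : Nat) :
    (PySem.List.pyRange 1 (1 + (n:Int)) 1).foldl
      (fun (s : List Char × Int) j =>
        if j == s.2 * s.2 then (s.1 ++ ['1'], s.2 + 1) else (s.1 ++ ['0'], s.2))
      ([], 1)
    = (pvTgt n, (Nat.sqrt n : Int) + 1) := by
  induction n with
  | zero => simp [PySem.List.pyRange_one_eq_nil, pvTgt]
  | succ m ih =>
    have hsplit : PySem.List.pyRange 1 (1 + ((m:Int)+1)) 1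
        = PySem.List.pyRange 1 (1 + (m:Int)) 1 ++ [1 + (m:Int)] := by
      have := PySem.List.pyRange_one_succ_right (a := 1) (b := 1 + (m:Int)) (by omega)
      rw [← this]; ring_nf
    have htgt : pvTgt (m+1) = pvTgt m ++ [if pvSqb (m+1) then '1' else '0'] := by
      simp [pvTgt, List.range_succ]
    push_cast
    rw [hsplit, List.foldl_append, ih]
    simp only [List.foldl_cons, List.foldl_nil]
    by_cases h : Nat.sqrt (m+1) * Nat.sqrt (m+1) = m + 1
    · have ht : Nat.sqrt (m+1) = Nat.sqrt m + 1 := by rw [pvLemB m, if_pos h]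
      have hnat : m + 1 = (Nat.sqrt m + 1) * (Nat.sqrt m + 1) := (pvLemA m).mpr h
      have hc : ((1 + (m:Int)) == ((Nat.sqrt m : Int) + 1) * ((Nat.sqrt m : Int) + 1)) = true := by
        rw [beq_iff_eq, add_comm]
        exact_mod_cast hnat
      have hsq : pvSqb (m+1) = true := by simp [pvSqb, h]
      rw [hc, if_pos rfl, htgt, hsq, if_pos rfl, ht]
      push_cast
      rfl
    · have ht : Nat.sqrt (m+1) = Nat.sqrt m := by rw [pvLemB m, if_neg h]
      have hc : ((1 + (m:Int)) == ((Nat.sqrt m : Int) + 1) * ((Nat.sqrt m : Int) + 1)) = false := by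
        rw [beq_eq_false_iff_ne]
        intro hcontra
        apply h
        apply (pvLemA m).mp
        have : ((m:Int)) + 1 = ((Nat.sqrt m : Int) + 1) * ((Nat.sqrt m : Int) + 1) := by
          rw [← hcontra]; ring
        exact_mod_cast this
      have hsq : pvSqb (m+1) = false := by simp [pvSqb, h]
      rw [hc, if_neg (by simp), htgt, hsq, if_neg (by simp), ht]

-- A's loop preserves the list length
lemma pvA_fold_length (k : Int) (l : List Int) (acc : List Int) :
    (l.foldl (fun acc i => if i^2 ≤ k then PySem.List.pySetD acc (i^2 - 1) 1 else acc) acc).length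
      = acc.length := by
  induction l generalizing acc with
  | nil => rfl
  | cons i l ih =>
    simp only [List.foldl_cons]
    rw [ih]
    split_ifs <;> simp [PySem.List.length_pySetD]

-- A's scatter-writes, pointwise: position n holds 1 iff some candidate root writes there
lemma pvA_fold_getElem (k : Int) (l : List Int) (acc : List Int) (n : Nat)
    (hmem : ∀ i ∈ l, 1 ≤ i) (hlen : acc.length = k.toNat) :
    (l.foldl (fun acc i => if i^2 ≤ k then PySem.List.pySetD acc (i^2 - 1) 1 else acc) acc)[n]?
      = if ∃ i ∈ l, i^2 ≤ k ∧ i^2 - 1 = (n:Int) then some 1 else acc[n]? := by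
  induction l generalizing acc with
  | nil => simp
  | cons i l ih =>
    have hi : 1 ≤ i := hmem i (by simp)
    have hsq : 0 ≤ i^2 - 1 := by nlinarith
    simp only [List.foldl_cons]
    by_cases hc : i^2 ≤ k
    · rw [if_pos hc]
      rw [ih _ (fun j hj => hmem j (by simp [hj])) (by simp [PySem.List.length_pySetD, hlen])]
      rw [PySem.List.pySetD_of_nonneg _ _ hsq]
      by_cases hhit : i^2 - 1 = (n:Int)
      · have hnk : n < k.toNat := by omega
        have htn : (i^2 - 1).toNat = n := by omega
        have hex : ∃ j ∈ i :: l, j^2 ≤ k ∧ j^2 - 1 = (n:Int) :=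
          ⟨i, by simp, hc, hhit⟩
        rw [if_pos hex]
        by_cases hl : ∃ j ∈ l, j^2 ≤ k ∧ j^2 - 1 = (n:Int)
        · rw [if_pos hl]
        · rw [if_neg hl, htn, List.getElem?_set, if_pos rfl, if_pos (by omega)]
      · have htn : (i^2 - 1).toNat ≠ n := by omega
        rw [List.getElem?_set, if_neg htn]
        by_cases hl : ∃ j ∈ l, j^2 ≤ k ∧ j^2 - 1 = (n:Int)
        · rw [if_pos hl, if_pos (by obtain ⟨j, hj, h1, h2⟩ := hl; exact ⟨j, by simp [hj], h1, h2⟩)]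
        · rw [if_neg hl, if_neg (by rintro ⟨j, hj, h1, h2⟩; simp at hj
                                    rcases hj with rfl | hj; · exact hhit h2
                                    · exact hl ⟨j, hj, h1, h2⟩)]
    · rw [if_neg hc]
      rw [ih _ (fun j hj => hmem j (by simp [hj])) hlen]
      by_cases hl : ∃ j ∈ l, j^2 ≤ k ∧ j^2 - 1 = (n:Int)
      · rw [if_pos hl, if_pos (by obtain ⟨j, hj, h1, h2⟩ := hl; exact ⟨j, by simp [hj], h1, h2⟩)]
      · rw [if_neg hl, if_neg (by rintro ⟨j, hj, h1, h2⟩; simp at hj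
                                  rcases hj with rfl | hj; · exact hc h1
                                  · exact hl ⟨j, hj, h1, h2⟩)]

-- the write-condition at position n is the perfect-square test on n+1
lemma pvCond_iff (k : Int) (n : Nat) (hn : (n:Int) < k) :
    (∃ i ∈ PySem.List.pyRange 1 (k+1) 1, i^2 ≤ k ∧ i^2 - 1 = (n:Int)) ↔ pvSqb (n+1) = true := by
  constructor
  · rintro ⟨i, hi, hik, hsq⟩
    rw [PySem.List.mem_pyRange_one] at hi
    have h2 : i ^ 2 = (n:Int) + 1 := by linarith
    have h3 : ((i.toNat : Int)) = i := by omega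
    have hm : i.toNat * i.toNat = n + 1 := by
      have : ((i.toNat * i.toNat : Nat) : Int) = (n:Int) + 1 := by
        push_cast [h3]
        rw [← pow_two]; exact h2
      exact_mod_cast this
    simp only [pvSqb, beq_iff_eq]
    rw [← hm, Nat.sqrt_eq]
  · intro h
    simp only [pvSqb, beq_iff_eq] at h
    have hm1 : 1 ≤ Nat.sqrt (n+1) := by nlinarith
    have hq : ((Nat.sqrt (n+1) : Int)) ^ 2 = (n:Int) + 1 := by
      rw [pow_two]; exact_mod_cast h
    refine ⟨((Nat.sqrt (n+1) : Int)), ?_, by linarith, by linarith⟩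
    rw [PySem.List.mem_pyRange_one]
    constructor
    · exact_mod_cast hm1
    · have hmm : ((Nat.sqrt (n+1) : Int)) ≤ ((Nat.sqrt (n+1) : Int)) * ((Nat.sqrt (n+1) : Int)) := by
        exact_mod_cast Nat.le_mul_of_pos_left _ hm1
      have : ((Nat.sqrt (n+1) : Int)) * ((Nat.sqrt (n+1) : Int)) = (n:Int) + 1 := by
        rw [← pow_two]; exact hq
      linarith

-- A's joined digits are exactly the target characters
lemma pvA_chars (k : Int) :
    (PySem.Str.join "" ((((PySem.List.pyRange 1 (k+1) 1).foldl
        (fun acc i => if i^2 ≤ k then PySem.List.pySetD acc (i^2 - 1) 1 else acc)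
        (List.replicate k.toNat (0:Int))).map PySem.Int.toStr))).toList = pvTgt k.toNat := by
  set line := (PySem.List.pyRange 1 (k+1) 1).foldl
      (fun acc i => if i^2 ≤ k then PySem.List.pySetD acc (i^2 - 1) 1 else acc)
      (List.replicate k.toNat (0:Int)) with hline
  have hlen : line.length = k.toNat := by
    rw [hline, pvA_fold_length]; simp
  have hline_eq : line = (List.range k.toNat).map (fun t => if pvSqb (t+1) then (1:Int) else 0) := by
    apply List.ext_getElem?
    intro n
    by_cases hn : n < k.toNat
    · rw [hline, pvA_fold_getElem k _ _ n
        (fun i hi => ((PySem.List.mem_pyRange_one).mp hi).1) (by simp)]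
      have hnk : (n:Int) < k := by omega
      rw [List.getElem?_map, List.getElem?_range hn]
      by_cases hsq : pvSqb (n+1) = true
      · rw [if_pos ((pvCond_iff k n hnk).mpr hsq)]
        simp [hsq]
      · rw [if_neg (fun hc => hsq ((pvCond_iff k n hnk).mp hc))]
        rw [List.getElem?_replicate, if_pos hn]
        simp [hsq]
    · rw [List.getElem?_eq_none (by simpa [hlen] using Nat.le_of_not_lt hn),
          List.getElem?_eq_none (by simpa using Nat.le_of_not_lt hn)]
  rw [hline_eq, PySem.Str.toList_join]
  have hmaps : (((List.range k.toNat).map (fun t => if pvSqb (t+1) then (1:Int) else 0)).map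
        PySem.Int.toStr).map String.toList
      = (pvTgt k.toNat).map (fun c => [c]) := by
    simp only [List.map_map, pvTgt]
    apply List.map_congr_left
    intro t _
    by_cases h : pvSqb (t+1) = true <;> simp [h, Function.comp] <;> decide
  rw [hmaps]
  have : ("" : String).toList = [] := rfl
  rw [this]
  exact PySem.Chars.join_nil_singletons _

-- ===== VERDICT (by name: the statement is the Claim_ definition above) =====
theorem Keymaker_spec : Claim_equal_Keymaker := by
  intro k _
  unfold Spec_Keymaker Keymaker Keymaker_alt
  by_cases h1 : k = 1
  · subst h1; decide
  rw [if_neg (by simpa using h1)]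
  dsimp only
  apply String.toList_inj.mp
  rw [String.toList_ofList]
  by_cases hk : k ≤ 0
  · have hr : PySem.List.pyRange 1 (k+1) 1 = [] := PySem.List.pyRange_one_eq_nil (by omega)
    have hk0 : k.toNat = 0 := by omega
    simp [hr, hk0, PySem.Str.toList_join]
  · have hcast : k + 1 = 1 + (k.toNat : Int) := by omega
    rw [hcast, pvB_fold k.toNat, ← hcast]
    exact pvA_chars k
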